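-- pv_equiv track=rewrite | github.com/shin9898/python_exercises_per_day | day14/solution.py | the_sum_of_the_differences
-- ===== SOURCE A (Python) =====
-- def the_sum_of_the_differences(num_list: list[int]) -> list[int]:
--     result_list = []
--     for i in range(len(num_list)):
--         if i != len(num_list) - 1:
--             result = (num_list[i - 1] - num_list[i]) + (num_list[i + 1] - num_list[i])
--             result_list.append(result)
--         else:
--             result = (num_list[i - 1] - num_list[i]) + (num_list[0] - num_list[i])
--             result_list.append(result)
--     return result_list
-- ===== SOURCE B (Python) =====
-- def the_sum_of_the_differences(num_list: list[int]) -> list[int]: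
--     # Discrete cyclic Laplacian as a difference of forward differences:
--     # d[i] = x[(i+1) % n] - x[i]; the answer at i is d[i] - d[i-1].
--     n = len(num_list)
--     if n == 0:
--         return []
--     d = [num_list[(i + 1) % n] - num_list[i] for i in range(n)]
--     return [d[i] - d[i - 1] for i in range(n)]
-- ===== Notes on version B (the rewrite author's own statement) =====
-- stated objective: alternative
-- what changed: Reformulated the cyclic neighbor sum as a second difference: a first pass builds the cyclic forward-difference list d, and a second pass returns d[i] - d[i-1], replacing A's wrap-branch indexing of the original list with staged passes over a derived difference list.
import Mathlib
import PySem

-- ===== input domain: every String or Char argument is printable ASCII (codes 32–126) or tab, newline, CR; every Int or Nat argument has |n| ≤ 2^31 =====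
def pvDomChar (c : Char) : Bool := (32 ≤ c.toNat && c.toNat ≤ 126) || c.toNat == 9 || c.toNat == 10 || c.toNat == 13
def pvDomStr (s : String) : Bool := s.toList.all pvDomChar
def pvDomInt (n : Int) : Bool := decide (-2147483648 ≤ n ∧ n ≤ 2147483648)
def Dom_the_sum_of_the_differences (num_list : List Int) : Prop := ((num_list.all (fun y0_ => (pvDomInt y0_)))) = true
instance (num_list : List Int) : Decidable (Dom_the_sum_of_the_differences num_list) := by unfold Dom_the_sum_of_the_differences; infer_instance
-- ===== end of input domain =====

-- B recomputes the result as a second difference: a first pass builds the cyclic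
-- forward-difference list d, a second pass returns d[i] - d[i-1] (objective: alternative).

-- ===== PORT A =====
-- all indices used are in range (i-1 ≥ -1 wraps; i+1 only when i < len-1), so pyGetD with default 0 is exact
def the_sum_of_the_differences (num_list : List Int) : List Int :=
  (PySem.List.pyRange 0 (PySem.List.len num_list) 1).foldl
    (fun result_list i =>
      if i ≠ PySem.List.len num_list - 1 then
        result_list ++ [(PySem.List.pyGetD num_list (i - 1) 0 - PySem.List.pyGetD num_list i 0)
          + (PySem.List.pyGetD num_list (i + 1) 0 - PySem.List.pyGetD num_list i 0)]
      else
        result_list ++ [(PySem.List.pyGetD num_list (i - 1) 0 - PySem.List.pyGetD num_list i 0)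
          + (PySem.List.pyGetD num_list 0 0 - PySem.List.pyGetD num_list i 0)])
    []

-- ===== PORT B =====
-- indices (i+1) % n and i are in range; d[i-1] at i = 0 is Python's d[-1] (the last element): pyGetD is exact
def the_sum_of_the_differences_alt (num_list : List Int) : List Int :=
  let n := PySem.List.len num_list
  if n = 0 then []
  else
    let d := (PySem.List.pyRange 0 n 1).map (fun i =>
      PySem.List.pyGetD num_list (PySem.Int.mod (i + 1) n) 0 - PySem.List.pyGetD num_list i 0)
    (PySem.List.pyRange 0 n 1).map (fun i =>
      PySem.List.pyGetD d i 0 - PySem.List.pyGetD d (i - 1) 0)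

-- ===== PRECONDITION & SPEC =====
def Spec_the_sum_of_the_differences (num_list : List Int) (out : List Int) : Prop := out = the_sum_of_the_differences_alt num_list
instance (num_list : List Int) (out : List Int) : Decidable (Spec_the_sum_of_the_differences num_list out) := by unfold Spec_the_sum_of_the_differences; infer_instance

-- ===== CLAIM (what is proved, stated in full; the proofs are below) =====
def Claim_equal_the_sum_of_the_differences : Prop := ∀ (num_list : List Int), Dom_the_sum_of_the_differences num_list → Spec_the_sum_of_the_differences num_list (the_sum_of_the_differences num_list)

-- ===== LEMMAS AND PROOFS =====

-- the element A's loop appends at position k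
def aElem (xs : List Int) (k : Nat) : Int :=
  if (k : Int) ≠ (xs.length : Int) - 1 then
    (PySem.List.pyGetD xs ((k : Int) - 1) 0 - PySem.List.pyGetD xs (k : Int) 0) +
      (PySem.List.pyGetD xs ((k : Int) + 1) 0 - PySem.List.pyGetD xs (k : Int) 0)
  else
    (PySem.List.pyGetD xs ((k : Int) - 1) 0 - PySem.List.pyGetD xs (k : Int) 0) +
      (PySem.List.pyGetD xs 0 0 - PySem.List.pyGetD xs (k : Int) 0)

-- B's first-pass element: the forward cyclic difference at position k
def dElem (xs : List Int) (k : Nat) : Int :=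
  PySem.List.pyGetD xs (PySem.Int.mod ((k : Int) + 1) (PySem.List.len xs)) 0 -
    PySem.List.pyGetD xs (k : Int) 0

-- A's loop as a map over List.range
lemma a_eq_map (xs : List Int) :
    the_sum_of_the_differences xs = (List.range xs.length).map (aElem xs) := by
  unfold the_sum_of_the_differences
  have hbody : (fun (result_list : List Int) (i : Int) =>
      if i ≠ PySem.List.len xs - 1 then
        result_list ++ [(PySem.List.pyGetD xs (i - 1) 0 - PySem.List.pyGetD xs i 0)
          + (PySem.List.pyGetD xs (i + 1) 0 - PySem.List.pyGetD xs i 0)]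
      else
        result_list ++ [(PySem.List.pyGetD xs (i - 1) 0 - PySem.List.pyGetD xs i 0)
          + (PySem.List.pyGetD xs 0 0 - PySem.List.pyGetD xs i 0)])
      = fun result_list i => result_list ++ [if i ≠ PySem.List.len xs - 1 then
        (PySem.List.pyGetD xs (i - 1) 0 - PySem.List.pyGetD xs i 0)
          + (PySem.List.pyGetD xs (i + 1) 0 - PySem.List.pyGetD xs i 0)
      else
        (PySem.List.pyGetD xs (i - 1) 0 - PySem.List.pyGetD xs i 0)
          + (PySem.List.pyGetD xs 0 0 - PySem.List.pyGetD xs i 0)] := by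
    funext acc i; split <;> rfl
  rw [hbody, PySem.List.foldl_append_singleton_eq_map, PySem.List.len_eq,
    PySem.List.pyRange_zero_natCast, List.map_map, List.nil_append]
  rfl

-- B as a map over List.range of second differences of dElem
lemma b_eq_map (xs : List Int) (hne : xs ≠ []) :
    the_sum_of_the_differences_alt xs =
      (List.range xs.length).map
        (fun k => dElem xs k - dElem xs (if k = 0 then xs.length - 1 else k - 1)) := by
  unfold the_sum_of_the_differences_alt
  have hn : 0 < xs.length := List.length_pos_iff.mpr hne
  rw [PySem.List.len_eq]
  rw [if_neg (by omega)]
  have hdlist : ((PySem.List.pyRange 0 (xs.length : Int) 1).map (fun i =>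
      PySem.List.pyGetD xs (PySem.Int.mod (i + 1) (xs.length : Int)) 0 -
        PySem.List.pyGetD xs i 0)) = (List.range xs.length).map (dElem xs) := by
    rw [PySem.List.pyRange_zero_natCast, List.map_map]
    apply List.map_congr_left
    intro a _
    simp only [Function.comp_apply, dElem, PySem.List.len_eq]
  rw [hdlist, PySem.List.pyRange_zero_natCast, List.map_map]
  apply List.map_congr_left
  intro k hk
  have hklt : k < xs.length := List.mem_range.mp hk
  simp only [Function.comp_apply]
  have hd0 : ∀ (j : Nat), j < xs.length →
      PySem.List.pyGetD ((List.range xs.length).map (dElem xs)) (j : Int) 0 = dElem xs j := by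
    intro j hj
    rw [PySem.List.pyGetD_natCast, List.getD_eq_getElem _ _ (by simpa using hj)]
    simp
  have hfst : PySem.List.pyGetD ((List.range xs.length).map (dElem xs)) (k : Int) 0
      = dElem xs k := hd0 k hklt
  have hsnd : PySem.List.pyGetD ((List.range xs.length).map (dElem xs)) ((k : Int) - 1) 0
      = dElem xs (if k = 0 then xs.length - 1 else k - 1) := by
    by_cases h0 : k = 0
    · rw [if_pos h0, h0]
      rw [show ((0 : Nat) : Int) - 1 = (-1 : Int) by omega]
      rw [PySem.List.pyGetD_neg_one _ 0 (by simp; omega)]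
      rw [List.getLast_eq_getElem]
      simp
    · rw [if_neg h0]
      rw [show ((k : Nat) : Int) - 1 = ((k - 1 : Nat) : Int) by omega]
      exact hd0 (k - 1) (by omega)
  rw [hfst, hsnd]

-- B's first-pass element as a plain list access (the mod computed out)
lemma dElem_eq (xs : List Int) (j : Nat) (hj : j < xs.length) :
    dElem xs j = xs.getD (if j = xs.length - 1 then 0 else j + 1) 0 - xs.getD j 0 := by
  unfold dElem
  rw [PySem.List.len_eq, PySem.List.pyGetD_natCast]
  by_cases hl : j = xs.length - 1
  · rw [if_pos hl]
    have : PySem.Int.mod ((j : Int) + 1) (xs.length : Int) = 0 := by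
      rw [PySem.Int.mod_eq_emod_of_pos (by omega),
        show ((j : Int) + 1) = (xs.length : Int) by omega, Int.emod_self]
    rw [this, PySem.List.pyGetD_zero]
  · rw [if_neg hl]
    have : PySem.Int.mod ((j : Int) + 1) (xs.length : Int) = ((j + 1 : Nat) : Int) := by
      rw [PySem.Int.mod_eq_emod_of_pos (by omega), Int.emod_eq_of_lt (by omega) (by omega)]
      omega
    rw [this, PySem.List.pyGetD_natCast]

-- the wrapped previous-element access in A
lemma prev_eq (xs : List Int) (hne : xs ≠ []) (k : Nat) (hk : k < xs.length) :
    PySem.List.pyGetD xs ((k : Int) - 1) 0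
      = xs.getD (if k = 0 then xs.length - 1 else k - 1) 0 := by
  by_cases h0 : k = 0
  · rw [if_pos h0, h0, show ((0 : Nat) : Int) - 1 = (-1 : Int) by omega,
      PySem.List.pyGetD_neg_one xs 0 hne, List.getLast_eq_getElem,
      List.getD_eq_getElem _ _ (by omega)]
  · rw [if_neg h0, show ((k : Nat) : Int) - 1 = ((k - 1 : Nat) : Int) by omega,
      PySem.List.pyGetD_natCast]

-- ===== VERDICT (by name: the statement is the Claim_ definition above) =====
theorem the_sum_of_the_differences_spec : Claim_equal_the_sum_of_the_differences := by
  intro xs _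
  unfold Spec_the_sum_of_the_differences
  match xs with
  | [] => decide
  | x :: t =>
    set xs := x :: t with hxs
    have hne : xs ≠ [] := by simp [hxs]
    have hn : 0 < xs.length := List.length_pos_iff.mpr hne
    rw [a_eq_map, b_eq_map xs hne]
    apply List.map_congr_left
    intro k hk
    have hklt : k < xs.length := List.mem_range.mp hk
    unfold aElem
    rw [prev_eq xs hne k hklt, PySem.List.pyGetD_natCast, PySem.List.pyGetD_zero,
      dElem_eq xs k hklt]
    by_cases h0 : k = 0
    · subst h0
      rw [if_pos rfl]
      rw [dElem_eq xs (xs.length - 1) (by omega)]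
      by_cases hl : (0 : Nat) = xs.length - 1
      · -- n = 1
        rw [if_neg (by omega : ¬ (((0 : Nat) : Int) ≠ (xs.length : Int) - 1)), if_pos hl,
          if_pos rfl]
        have h1 : xs.length - 1 = 0 := by omega
        rw [h1]
        ring
      · rw [if_pos (by omega : ((0 : Nat) : Int) ≠ (xs.length : Int) - 1), if_neg hl,
          if_pos rfl, show (((0 : Nat)) : Int) + 1 = (((0 : Nat) + 1 : Nat) : Int) by omega,
          PySem.List.pyGetD_natCast]
        ring
    · rw [if_neg h0]
      rw [dElem_eq xs (k - 1) (by omega)]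
      rw [if_neg (by omega : ¬ (k - 1 = xs.length - 1)),
        show k - 1 + 1 = k by omega]
      by_cases hl : k = xs.length - 1
      · rw [if_neg (by omega : ¬ ((k : Int) ≠ (xs.length : Int) - 1)), if_pos hl]
        ring
      · rw [if_pos (by omega : (k : Int) ≠ (xs.length : Int) - 1), if_neg hl,
          show ((k : Nat) : Int) + 1 = ((k + 1 : Nat) : Int) by omega,
          PySem.List.pyGetD_natCast]
        ring
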